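-- pv_equiv track=rewrite | github.com/odylle/adventofcode | 2015/3/day3.py | SplitCoordinates
-- ===== SOURCE A (Python) =====
-- def NewCoordinate(move, h, v):
--     if move == '>':
--         h += 1
--     elif move == '<':
--         h -= 1
--     elif move == '^':
--         v += 1
--     elif move == 'v':
--         v -= 1
--     return h, v
--
-- def SplitCoordinates(input):
--     coordinates = [(0,0)]
--     santa_location = robot_location = (0,0)
--     for i in range(len(input)):
--         if i % 2 == 0:
--             h, v = santa_location
--             new = (NewCoordinate(input[i], h, v))
--             santa_location = new
--         else:
--             h, v = robot_location
--             new = (NewCoordinate(input[i], h, v))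
--             robot_location =new
--         coordinates.append(new)
--     return coordinates
-- ===== SOURCE B (Python) =====
-- DELTA = {'>': (1, 0), '<': (-1, 0), '^': (0, 1), 'v': (0, -1)}
--
-- def _trajectory(moves):
--     x = y = 0
--     out = []
--     for m in moves:
--         dx, dy = DELTA.get(m, (0, 0))
--         x += dx
--         y += dy
--         out.append((x, y))
--     return out
--
-- def SplitCoordinates(input):
--     santa = _trajectory(input[0::2])
--     robot = _trajectory(input[1::2])
--     merged = [p for pair in zip(santa, robot) for p in pair]
--     return [(0, 0)] + merged + santa[len(robot):]
-- ===== Notes on version B (the rewrite author's own statement) =====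
-- stated objective: alternative
-- what changed: Replaced A's single parity-switching loop over indices (two mutable locations updated alternately) by two independent prefix-sum trajectory scans over the even- and odd-indexed move slices, using a delta table instead of an if-chain, merged back by zip plus the leftover santa tail.
import Mathlib
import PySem

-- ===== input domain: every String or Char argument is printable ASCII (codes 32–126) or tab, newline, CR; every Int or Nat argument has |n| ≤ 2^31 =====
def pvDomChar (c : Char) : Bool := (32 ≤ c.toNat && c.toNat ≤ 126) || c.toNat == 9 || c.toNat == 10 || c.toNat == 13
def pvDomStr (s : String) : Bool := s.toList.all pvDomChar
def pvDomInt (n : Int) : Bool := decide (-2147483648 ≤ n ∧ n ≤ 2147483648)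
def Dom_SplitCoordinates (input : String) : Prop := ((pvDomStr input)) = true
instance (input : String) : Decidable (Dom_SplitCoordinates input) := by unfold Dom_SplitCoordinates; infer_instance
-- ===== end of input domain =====

-- B replaces A's single parity-switching loop by two independent trajectory scans
-- (santa = even-indexed moves, robot = odd-indexed) merged by zip; objective: alternative decomposition.

-- ===== PORT A =====
def NewCoordinate (move : Char) (h v : Int) : Int × Int :=
  if move = '>' then (h + 1, v)
  else if move = '<' then (h - 1, v)
  else if move = '^' then (h, v + 1)
  else if move = 'v' then (h, v - 1)
  else (h, v)

-- A's indexed loop, as the obvious structural recursion over the characters in order,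
-- with i % 2 carried as the boolean `even` and the two locations as state.
def aLoop : List Char → Bool → (Int × Int) → (Int × Int) → List (Int × Int)
  | [], _, _, _ => []
  | c :: rest, even, santa, robot =>
    if even then
      let new := NewCoordinate c santa.1 santa.2
      new :: aLoop rest false new robot
    else
      let new := NewCoordinate c robot.1 robot.2
      new :: aLoop rest true santa new

def SplitCoordinates (input : String) : List (Int × Int) :=
  (0, 0) :: aLoop input.toList true (0, 0) (0, 0)

-- ===== PORT B =====
def deltaDict : PySem.Dict Char (Int × Int) :=
  PySem.Dict.ofList [('>', (1, 0)), ('<', (-1, 0)), ('^', (0, 1)), ('v', (0, -1))]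

-- Source B's _trajectory: running positions accumulated from (x, y)
def trajectory : List Char → Int → Int → List (Int × Int)
  | [], _, _ => []
  | m :: rest, x, y =>
    let d := PySem.Dict.getD deltaDict m (0, 0)
    (x + d.1, y + d.2) :: trajectory rest (x + d.1) (y + d.2)

-- hand ports of the step-2 slices input[0::2] and input[1::2] (exact: PySem has no step slices)
mutual
def evens : List Char → List Char
  | [] => []
  | c :: rest => c :: odds rest
def odds : List Char → List Char
  | [] => []
  | _ :: rest => evens rest
end
def SplitCoordinates_alt (input : String) : List (Int × Int) :=
  let santa := trajectory (evens input.toList) 0 0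
  let robot := trajectory (odds input.toList) 0 0
  -- [p for pair in zip(santa, robot) for p in pair]  then  + santa[len(robot):]
  (0, 0) :: ((santa.zip robot).foldr (fun p acc => p.1 :: p.2 :: acc) [] ++ santa.drop robot.length)

-- ===== PRECONDITION & SPEC =====
def Spec_SplitCoordinates (input : String) (out : List (Int × Int)) : Prop := out = SplitCoordinates_alt input
instance (input : String) (out : List (Int × Int)) : Decidable (Spec_SplitCoordinates input out) := by unfold Spec_SplitCoordinates; infer_instance

-- ===== CLAIM (what is proved, stated in full; the proofs are below) =====
def Claim_equal_SplitCoordinates : Prop := ∀ (input : String), Dom_SplitCoordinates input → Spec_SplitCoordinates input (SplitCoordinates input)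

-- ===== LEMMAS AND PROOFS =====

lemma getD_of_other (c : Char) (h1 : c ≠ '>') (h2 : c ≠ '<') (h3 : c ≠ '^') (h4 : c ≠ 'v') :
    PySem.Dict.getD deltaDict c (0, 0) = (0, 0) := by
  have hitems : deltaDict.items = [('>', (1, 0)), ('<', (-1, 0)), ('^', (0, 1)), ('v', (0, -1))] := by
    decide
  have e1 : ('>' == c) = false := by simp [Ne.symm h1]
  have e2 : ('<' == c) = false := by simp [Ne.symm h2]
  have e3 : ('^' == c) = false := by simp [Ne.symm h3]
  have e4 : ('v' == c) = false := by simp [Ne.symm h4]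
  simp [PySem.Dict.getD, PySem.Dict.get?, hitems, List.find?, e1, e2, e3, e4]

lemma step_eq (c : Char) (h v : Int) :
    NewCoordinate c h v =
      (h + (PySem.Dict.getD deltaDict c (0, 0)).1, v + (PySem.Dict.getD deltaDict c (0, 0)).2) := by
  simp only [NewCoordinate]
  split_ifs with h1 h2 h3 h4
  · subst h1
    have hd : PySem.Dict.getD deltaDict '>' (0, 0) = (1, 0) := by decide
    rw [hd]; simp
  · subst h2
    have hd : PySem.Dict.getD deltaDict '<' (0, 0) = (-1, 0) := by decide
    rw [hd]; simp; ring
  · subst h3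
    have hd : PySem.Dict.getD deltaDict '^' (0, 0) = (0, 1) := by decide
    rw [hd]; simp
  · subst h4
    have hd : PySem.Dict.getD deltaDict 'v' (0, 0) = (0, -1) := by decide
    rw [hd]; simp; ring
  · rw [getD_of_other c h1 h2 h3 h4]; simp

lemma two_step_induction {P : List Char → Prop} (h0 : P []) (h1 : ∀ c, P [c])
    (h2 : ∀ c d l, P l → P (c :: d :: l)) : ∀ l, P l
  | [] => h0
  | [c] => h1 c
  | c :: d :: l => h2 c d l (two_step_induction h0 h1 h2 l)

lemma main_loop : ∀ (l : List Char) (s r : Int × Int),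
    aLoop l true s r =
      (((trajectory (evens l) s.1 s.2).zip (trajectory (odds l) r.1 r.2)).foldr
          (fun p acc => p.1 :: p.2 :: acc) [] ++
        (trajectory (evens l) s.1 s.2).drop (trajectory (odds l) r.1 r.2).length) := by
  refine two_step_induction ?_ ?_ ?_
  · intro s r
    simp [aLoop, evens, odds, trajectory]
  · intro c s r
    simp [aLoop, evens, odds, trajectory, step_eq]
  · intro c d l ih s r
    simp only [aLoop, evens, odds, trajectory, step_eq, if_pos, if_neg, Bool.false_eq_true,
      not_false_iff, List.zip_cons_cons, List.foldr_cons, List.length_cons, List.drop_succ_cons,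
      List.cons_append]
    simp [ih]

theorem SplitCoordinates_spec : Claim_equal_SplitCoordinates := by
  intro input _
  unfold Spec_SplitCoordinates SplitCoordinates SplitCoordinates_alt
  simp [main_loop]
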